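-- pv_equiv track=rewrite | github.com/hoakhongmau98/Discord-Bot | Password/deconvert_password.py | rebuild_password
-- ===== SOURCE A (Python) =====
-- def rebuild_password(str_in,lst_chr):
-- 	xa = 0
-- 	xy = 1
-- 	while xy < len(str_in):
-- 		if (xy + 2) == len(str_in):
-- 			str_in[xy] = lst_chr[xa]
-- 			str_in[xy+1] = lst_chr[xa+1]
-- 			xy += 3
-- 			xa += 2
-- 		elif (xy + 1) == len(str_in):
-- 			str_in[xy] = lst_chr[xa]
-- 			xy += 3
-- 			xa += 2
-- 		else:
-- 			str_in[xy] = lst_chr[xa]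
-- 			str_in[xy+1] =lst_chr[xa+1]
-- 			xy += 3
-- 			xa += 2
-- 	return str_in
-- ===== SOURCE B (Python) =====
-- def rebuild_password(str_in, lst_chr):
--     k = 0
--     for i in range(1, len(str_in)):
--         if i % 3 != 0:
--             str_in[i] = lst_chr[k]
--             k += 1
--     return str_in
-- ===== Notes on version B (the rewrite author's own statement) =====
-- stated objective: simpler
-- what changed: Replaces the stride-3 while loop with two indices and three near-duplicate write branches by a single left-to-right scan over all indices with a modulo test and one consumption counter.
import Mathlib
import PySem

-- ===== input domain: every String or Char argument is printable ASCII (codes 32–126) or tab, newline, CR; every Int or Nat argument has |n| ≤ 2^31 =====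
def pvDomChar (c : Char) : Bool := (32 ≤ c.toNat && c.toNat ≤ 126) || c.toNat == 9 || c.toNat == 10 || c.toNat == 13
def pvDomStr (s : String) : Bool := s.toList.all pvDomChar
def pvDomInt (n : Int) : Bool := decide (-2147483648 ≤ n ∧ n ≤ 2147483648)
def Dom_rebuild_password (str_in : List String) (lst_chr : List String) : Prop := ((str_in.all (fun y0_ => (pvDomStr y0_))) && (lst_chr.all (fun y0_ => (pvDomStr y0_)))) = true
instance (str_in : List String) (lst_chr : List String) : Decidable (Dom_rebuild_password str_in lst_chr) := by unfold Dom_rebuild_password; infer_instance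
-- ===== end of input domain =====

-- B replaces A's stride-3 while loop (two indices, three near-duplicate branches) by one
-- left-to-right index scan with a modulo test and a single consumption counter ("simpler");
-- both Pythons mutate str_in in place identically, the theorem is about the return value.


-- ===== PORT A =====
-- literal transliteration of A's while loop; lst_chr[xa] is List.getD (inside
-- Pre_rebuild_password every such access is in range, exactly where Python does not raise)
def rebuildLoopA (lst_chr : List String) (str_in : List String) (xy xa : Nat) : List String :=
  if xy < str_in.length then
    if xy + 2 = str_in.length then
      rebuildLoopA lst_chr
        ((str_in.set xy (lst_chr.getD xa "")).set (xy+1) (lst_chr.getD (xa+1) ""))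
        (xy+3) (xa+2)
    else if xy + 1 = str_in.length then
      rebuildLoopA lst_chr (str_in.set xy (lst_chr.getD xa "")) (xy+3) (xa+2)
    else
      rebuildLoopA lst_chr
        ((str_in.set xy (lst_chr.getD xa "")).set (xy+1) (lst_chr.getD (xa+1) ""))
        (xy+3) (xa+2)
  else str_in
termination_by str_in.length - xy
decreasing_by all_goals simp [List.length_set]; omega

def rebuild_password (str_in : List String) (lst_chr : List String) : List String :=
  rebuildLoopA lst_chr str_in 1 0

-- ===== PORT B =====
-- one scan over range(1, len(str_in)); state = (current list, consumption counter k)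
def altStep (lst_chr : List String) (st : List String × Nat) (i : Nat) : List String × Nat :=
  if i % 3 ≠ 0 then (st.1.set i (lst_chr.getD st.2 ""), st.2 + 1) else st

def rebuild_password_alt (str_in : List String) (lst_chr : List String) : List String :=
  ((List.range' 1 (str_in.length - 1)).foldl (altStep lst_chr) (str_in, 0)).1

-- ===== PRECONDITION & SPEC =====
-- Pre_ excludes exactly the inputs on which Python A raises IndexError: lst_chr shorter
-- than the number of written slots (indices 1 ≤ i < len with i % 3 ≠ 0).
def Pre_rebuild_password (str_in : List String) (lst_chr : List String) : Prop :=
  (str_in.length - 1) - (str_in.length - 1) / 3 ≤ lst_chr.length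
instance (str_in : List String) (lst_chr : List String) : Decidable (Pre_rebuild_password str_in lst_chr) := by unfold Pre_rebuild_password; infer_instance
def pvWitness_rebuild_password : List String × List String := (["a", "b", "c"], ["x", "y"])

def Spec_rebuild_password (str_in : List String) (lst_chr : List String) (out : List String) : Prop := out = rebuild_password_alt str_in lst_chr
instance (str_in : List String) (lst_chr : List String) (out : List String) : Decidable (Spec_rebuild_password str_in lst_chr out) := by unfold Spec_rebuild_password; infer_instance

-- ===== CLAIM (what is proved, stated in full; the proofs are below) =====
def Claim_equal_rebuild_password : Prop := ∀ (str_in : List String) (lst_chr : List String), Dom_rebuild_password str_in lst_chr → Pre_rebuild_password str_in lst_chr → Spec_rebuild_password str_in lst_chr (rebuild_password str_in lst_chr)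

-- ===== LEMMAS AND PROOFS =====

-- A's loop from position xy (with xy % 3 = 1) equals B's fold over the remaining indices.
lemma loopA_eq_fold (lst : List String) :
    ∀ (fuel s_len_minus : Nat) (s : List String) (xy xa : Nat),
      s.length - xy ≤ fuel → xy % 3 = 1 → s_len_minus = s.length - xy →
      rebuildLoopA lst s xy xa
        = ((List.range' xy s_len_minus).foldl (altStep lst) (s, xa)).1 := by
  intro fuel
  induction fuel with
  | zero =>
      intro m s xy xa hle hmod hm
      have h0 : m = 0 := by omega
      rw [rebuildLoopA]
      have : ¬ xy < s.length := by omega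
      simp [this, h0]
  | succ fuel ih =>
      intro m s xy xa hle hmod hm
      by_cases hlt : xy < s.length
      · by_cases h2 : xy + 2 = s.length
        · -- last full block: two writes, loop ends
          rw [rebuildLoopA]
          simp only [if_pos hlt, if_pos h2]
          rw [rebuildLoopA]
          have hm2 : m = 2 := by omega
          have m1 : xy % 3 ≠ 0 := by omega
          have m2 : (xy + 1) % 3 ≠ 0 := by omega
          subst hm2
          simp [List.range', altStep, m1, m2]
          exact fun hcon => absurd hcon (by omega)
        · by_cases h1 : xy + 1 = s.length
          · -- partial last block: one write, loop ends
            rw [rebuildLoopA]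
            simp only [if_pos hlt, if_neg h2, if_pos h1]
            rw [rebuildLoopA]
            have hm1 : m = 1 := by omega
            have m1 : xy % 3 ≠ 0 := by omega
            subst hm1
            simp [List.range', altStep, m1]
            exact fun hcon => absurd hcon (by omega)
          · -- interior block: two writes, continue at xy+3
            rw [rebuildLoopA]
            simp only [if_pos hlt, if_neg h2, if_neg h1]
            have hge3 : xy + 3 ≤ s.length := by omega
            have hrec := ih (s.length - (xy + 3))
              ((s.set xy (lst.getD xa "")).set (xy+1) (lst.getD (xa+1) "")) (xy+3) (xa+2)
              (by simp [List.length_set]; omega) (by omega) (by simp [List.length_set])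
            rw [hrec]
            have hmsplit : m = (s.length - (xy + 3)) + 3 := by omega
            have m1 : xy % 3 ≠ 0 := by omega
            have m2 : (xy + 1) % 3 ≠ 0 := by omega
            have m3 : (xy + 2) % 3 = 0 := by omega
            subst hmsplit
            simp [List.range'_succ, altStep, m1, m2, m3]
      · rw [rebuildLoopA]
        have hm0 : m = 0 := by omega
        simp [hlt, hm0]

-- ===== VERDICT (by name: the statement is the Claim_ definition above) =====
theorem rebuild_password_spec : Claim_equal_rebuild_password := by
  intro str_in lst_chr _ _
  unfold Spec_rebuild_password rebuild_password rebuild_password_alt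
  exact loopA_eq_fold lst_chr (str_in.length - 1) (str_in.length - 1) str_in 1 0
    (le_refl _) (by omega) rfl
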